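-- pv_equiv track=rewrite | github.com/CyberRadio/NDRCommandLine | ndrcommandline/scripts/ndrxxx_command_line.py | getIndexOfQuotes
-- ===== SOURCE A (Python) =====
-- def getIndexOfQuotes(inStr):
--     """
--     Get the start and end index of the first pair of quotes in a string.
--     """
--     beginQuote = -1
--     endQuote = -1
--     count = 0
--     for char in inStr:
--         if char == '"' and beginQuote == -1 and endQuote == -1:
--             beginQuote = count
--         elif char == '"' and beginQuote > -1 and endQuote == -1:
--             endQuote = count
--         count +=1
--     return beginQuote, endQuote
-- ===== SOURCE B (Python) =====
-- def getIndexOfQuotes(inStr):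
--     """
--     Get the start and end index of the first pair of quotes in a string.
--     """
--     qs = [i for i, c in enumerate(inStr) if c == '"']
--     if not qs:
--         return -1, -1
--     if len(qs) == 1:
--         return qs[0], -1
--     return qs[0], qs[1]
-- ===== Notes on version B (the rewrite author's own statement) =====
-- stated objective: alternative
-- what changed: Instead of a stateful scan tracking begin/end/count, B materialises the list of ALL quote positions with an enumerate comprehension in one stage and then selects the first two (padding with -1) in a second stage.
import Mathlib
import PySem

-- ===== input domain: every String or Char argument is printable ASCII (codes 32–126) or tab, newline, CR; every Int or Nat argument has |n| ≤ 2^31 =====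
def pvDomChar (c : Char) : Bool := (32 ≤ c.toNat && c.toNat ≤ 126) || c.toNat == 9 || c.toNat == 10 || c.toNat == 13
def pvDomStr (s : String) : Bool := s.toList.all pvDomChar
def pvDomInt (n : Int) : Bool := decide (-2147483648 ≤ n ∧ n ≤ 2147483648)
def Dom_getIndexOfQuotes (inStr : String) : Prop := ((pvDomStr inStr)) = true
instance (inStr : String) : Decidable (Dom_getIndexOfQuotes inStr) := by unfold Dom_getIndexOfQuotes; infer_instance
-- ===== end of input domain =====

-- B replaces A's stateful begin/end/count scan by a two-stage computation: collect all quote positions via an enumerate comprehension, then pick the first two; alternative decomposition, same O(n) cost.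


-- ===== PORT A =====
-- one loop step: (beginQuote, endQuote, count) updated exactly as A's branches do
def pvStepA (st : Int × Int × Int) (c : Char) : Int × Int × Int :=
  let b := st.1
  let e := st.2.1
  let cnt := st.2.2
  if c = '"' ∧ b = -1 ∧ e = -1 then (cnt, e, cnt + 1)
  else if c = '"' ∧ b > -1 ∧ e = -1 then (b, cnt, cnt + 1)
  else (b, e, cnt + 1)

def getIndexOfQuotes (inStr : String) : Int × Int :=
  let st := inStr.toList.foldl pvStepA (-1, -1, 0)
  (st.1, st.2.1)

-- ===== PORT B =====
def getIndexOfQuotes_alt (inStr : String) : Int × Int :=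
  -- qs = [i for i, c in enumerate(inStr) if c == '"']
  let qs := (PySem.List.enumerate inStr.toList 0).filterMap
              (fun p => if p.2 = '"' then some p.1 else none)
  match qs with
  | [] => (-1, -1)
  | [a] => (a, -1)
  | a :: b :: _ => (a, b)

-- ===== PRECONDITION & SPEC =====
def Spec_getIndexOfQuotes (inStr : String) (out : Int × Int) : Prop := out = getIndexOfQuotes_alt inStr
instance (inStr : String) (out : Int × Int) : Decidable (Spec_getIndexOfQuotes inStr out) := by unfold Spec_getIndexOfQuotes; infer_instance

-- ===== CLAIM (what is proved, stated in full; the proofs are below) =====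
def Claim_equal_getIndexOfQuotes : Prop := ∀ (inStr : String), Dom_getIndexOfQuotes inStr → Spec_getIndexOfQuotes inStr (getIndexOfQuotes inStr)

-- ===== LEMMAS AND PROOFS =====

-- the list of quote positions of l, indices starting at n (proof-side characterisation)
def pvQs (n : Int) : List Char → List Int
  | [] => []
  | c :: t => if c = '"' then n :: pvQs (n + 1) t else pvQs (n + 1) t

-- B's comprehension computes pvQs
theorem pv_filterMap_eq_qs (l : List Char) (n : Int) :
    (PySem.List.enumerate l n).filterMap
        (fun p => if p.2 = '"' then some p.1 else none) = pvQs n l := by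
  induction l generalizing n with
  | nil => simp [PySem.List.enumerate_nil, pvQs]
  | cons c t ih =>
    rw [PySem.List.enumerate_cons, List.filterMap_cons]
    by_cases hc : c = '"' <;> simp [pvQs, hc, ih]

-- step evaluation in each phase
theorem pv_stepA_q1 (n : Int) : pvStepA (-1, -1, n) '"' = (n, -1, n + 1) := by
  simp only [pvStepA]; split_ifs with h1 h2 <;> simp_all

theorem pv_stepA_q2 (b n : Int) (hb : b > -1) : pvStepA (b, -1, n) '"' = (b, n, n + 1) := by
  simp only [pvStepA]; split_ifs with h1 h2 <;> simp_all

theorem pv_stepA_other (b e n : Int) (c : Char) (hc : c ≠ '"') :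
    pvStepA (b, e, n) c = (b, e, n + 1) := by
  simp only [pvStepA]; split_ifs with h1 h2 <;> simp_all

theorem pv_stepA_done (b e n : Int) (c : Char) (he : e ≠ -1) :
    pvStepA (b, e, n) c = (b, e, n + 1) := by
  simp only [pvStepA]; split_ifs with h1 h2 <;> simp_all

-- once endQuote ≠ -1, the fold never changes (beginQuote, endQuote)
theorem pv_fold_done (l : List Char) (b e n : Int) (he : e ≠ -1) :
    (l.foldl pvStepA (b, e, n)).1 = b ∧ (l.foldl pvStepA (b, e, n)).2.1 = e := by
  induction l generalizing n with
  | nil => exact ⟨rfl, rfl⟩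
  | cons c l ih =>
    rw [List.foldl_cons, pv_stepA_done b e n c he]
    exact ih (n + 1)

-- after the first quote: endQuote becomes the head of pvQs (or stays -1)
theorem pv_fold_phase2 (l : List Char) (b n : Int) (hb : b > -1) (hn : 0 ≤ n) :
    (l.foldl pvStepA (b, -1, n)).1 = b ∧
    (l.foldl pvStepA (b, -1, n)).2.1 = ((pvQs n l).head?).getD (-1) := by
  induction l generalizing n with
  | nil => exact ⟨rfl, rfl⟩
  | cons c l ih =>
    by_cases hc : c = '"'
    · subst hc
      rw [List.foldl_cons, pv_stepA_q2 b n hb]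
      have hd := pv_fold_done l b n (n + 1) (by omega)
      exact ⟨hd.1, by rw [hd.2]; simp [pvQs]⟩
    · rw [List.foldl_cons, pv_stepA_other b (-1) n c hc]
      have := ih (n + 1) (by omega)
      exact ⟨this.1, by rw [this.2]; simp [pvQs, hc]⟩

-- from the initial state: (beginQuote, endQuote) = first two elements of pvQs (padded with -1)
theorem pv_fold_phase1 (l : List Char) (n : Int) (hn : 0 ≤ n) :
    ((l.foldl pvStepA (-1, -1, n)).1, (l.foldl pvStepA (-1, -1, n)).2.1) =
      (match pvQs n l with
       | [] => (-1, -1)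
       | [a] => (a, -1)
       | a :: b :: _ => (a, b)) := by
  induction l generalizing n with
  | nil => rfl
  | cons c l ih =>
    by_cases hc : c = '"'
    · subst hc
      rw [List.foldl_cons, pv_stepA_q1 n]
      have hp2 := pv_fold_phase2 l n (n + 1) (by omega) (by omega)
      simp only [pvQs, reduceIte]
      rw [hp2.1, hp2.2]
      cases hq : pvQs (n + 1) l with
      | nil => rfl
      | cons a t => rfl
    · rw [List.foldl_cons, pv_stepA_other (-1) (-1) n c hc]
      rw [ih (n + 1) (by omega)]
      simp [pvQs, hc]

-- ===== VERDICT (by name: the statement is the Claim_ definition above) =====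
theorem getIndexOfQuotes_spec : Claim_equal_getIndexOfQuotes := by
  intro inStr _
  unfold Spec_getIndexOfQuotes getIndexOfQuotes getIndexOfQuotes_alt
  rw [pv_filterMap_eq_qs]
  exact pv_fold_phase1 inStr.toList 0 (by omega)
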